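-- pv_equiv track=rewrite | github.com/ddl-nick-goble/domino-endpoint-to-excel-UDFs | expected_loss_models/register_models.py | normalize_endpoint_name
-- ===== SOURCE A (Python) =====
-- def normalize_endpoint_name(name: str) -> str:
--     if not any(ch for ch in name if not ch.isalnum()):
--         return name
--     parts = []
--     current = []
--     for ch in name:
--         if ch.isalnum():
--             current.append(ch)
--         elif current:
--             parts.append("".join(current))
--             current = []
--     if current:
--         parts.append("".join(current))
--     return "".join(part[:1].upper() + part[1:] for part in parts if part)
-- ===== SOURCE B (Python) =====
-- def normalize_endpoint_name(name: str) -> str: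
--     if all(ch.isalnum() for ch in name):
--         return name
--     out = []
--     i, n = 0, len(name)
--     while i < n:
--         if name[i].isalnum():
--             j = i
--             while j < n and name[j].isalnum():
--                 j += 1
--             out.append(name[i].upper() + name[i + 1:j])
--             i = j
--         else:
--             i += 1
--     return "".join(out)
-- ===== Notes on version B (the rewrite author's own statement) =====
-- stated objective: alternative
-- what changed: Replaces A's per-character fold with a parts/current buffer pair plus a separate capitalize-and-join pass by a single index scan that finds each maximal alphanumeric run with an inner scan and emits it capitalized immediately.
import Mathlib
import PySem

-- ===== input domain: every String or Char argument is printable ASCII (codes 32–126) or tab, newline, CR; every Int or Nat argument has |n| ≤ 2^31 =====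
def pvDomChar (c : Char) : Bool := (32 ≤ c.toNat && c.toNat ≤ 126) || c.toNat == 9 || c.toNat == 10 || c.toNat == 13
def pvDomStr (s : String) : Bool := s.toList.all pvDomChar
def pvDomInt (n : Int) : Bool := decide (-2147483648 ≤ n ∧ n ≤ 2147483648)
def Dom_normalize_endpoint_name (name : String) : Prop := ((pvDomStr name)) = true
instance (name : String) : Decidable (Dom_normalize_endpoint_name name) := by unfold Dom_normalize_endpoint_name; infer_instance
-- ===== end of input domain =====

-- B replaces A's fold with a parts/current buffer pair by a single index scan that
-- emits each maximal alphanumeric run capitalized immediately (alternative decomposition).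

-- ===== PORT A =====
-- one loop step of A's for-loop over (parts, current)
def pvAStep (st : List (List Char) × List Char) (ch : Char) : List (List Char) × List Char :=
  if PySem.Chars.isalnum ch then (st.1, st.2 ++ [ch])
  else if st.2 ≠ [] then (st.1 ++ [st.2], [])
  else st

-- part[:1].upper() + part[1:]
def pvCap (part : List Char) : List Char :=
  PySem.Chars.upper (PySem.Chars.slice part none (some 1)) ++ PySem.Chars.slice part (some 1) none

def normalize_endpoint_name (name : String) : String :=
  let cs := name.toList
  if (cs.filter (fun ch => !PySem.Chars.isalnum ch)).isEmpty then name
  else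
    let st := cs.foldl pvAStep ([], [])
    let parts := if st.2 ≠ [] then st.1 ++ [st.2] else st.1
    String.ofList (((parts.filter (fun part => part ≠ [])).map pvCap).flatten)

-- ===== PORT B =====
-- B's outer while-loop on index i, transcribed on the remaining suffix name[i:];
-- the inner while-loop finding j is the takeWhile/dropWhile pair.
def pvAltLoop (cs : List Char) : List Char :=
  match cs with
  | [] => []
  | c :: rest =>
    if PySem.Chars.isalnum c then
      (PySem.Chars.upperChar c :: rest.takeWhile PySem.Chars.isalnum)
        ++ pvAltLoop (rest.dropWhile PySem.Chars.isalnum)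
    else pvAltLoop rest
termination_by cs.length
decreasing_by
  · simp only [List.length_cons]
    exact Nat.lt_succ_of_le (List.length_dropWhile_le _ _)
  · simp

def normalize_endpoint_name_alt (name : String) : String :=
  let cs := name.toList
  if cs.all PySem.Chars.isalnum then name
  else String.ofList (pvAltLoop cs)

-- ===== PRECONDITION & SPEC =====
def Spec_normalize_endpoint_name (name : String) (out : String) : Prop := out = normalize_endpoint_name_alt name
instance (name : String) (out : String) : Decidable (Spec_normalize_endpoint_name name out) := by unfold Spec_normalize_endpoint_name; infer_instance

-- ===== CLAIM (what is proved, stated in full; the proofs are below) =====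
def Claim_equal_normalize_endpoint_name : Prop := ∀ (name : String), Dom_normalize_endpoint_name name → Spec_normalize_endpoint_name name (normalize_endpoint_name name)

-- ===== LEMMAS AND PROOFS =====

-- the maximal alphanumeric runs of cs (proof-side characterisation)
def pvRuns (cs : List Char) : List (List Char) :=
  match cs with
  | [] => []
  | c :: rest =>
    if PySem.Chars.isalnum c then
      (c :: rest.takeWhile PySem.Chars.isalnum) :: pvRuns (rest.dropWhile PySem.Chars.isalnum)
    else pvRuns rest
termination_by cs.length
decreasing_by
  · simp only [List.length_cons]
    exact Nat.lt_succ_of_le (List.length_dropWhile_le _ _)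
  · simp

-- A's loop with a pending buffer cur, as a recursion over the remaining input
def pvRunsFrom (cur : List Char) (cs : List Char) : List (List Char) :=
  match cs with
  | [] => if cur ≠ [] then [cur] else []
  | c :: rest =>
    if PySem.Chars.isalnum c then pvRunsFrom (cur ++ [c]) rest
    else if cur ≠ [] then cur :: pvRunsFrom [] rest
    else pvRunsFrom [] rest

theorem pvA_loop_eq (cs : List Char) : ∀ (parts : List (List Char)) (cur : List Char),
    (let st := cs.foldl pvAStep (parts, cur)
     if st.2 ≠ [] then st.1 ++ [st.2] else st.1) = parts ++ pvRunsFrom cur cs := by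
  induction cs with
  | nil =>
    intro parts cur
    by_cases h : cur = [] <;> simp [pvRunsFrom, h]
  | cons c rest ih =>
    intro parts cur
    simp only [List.foldl_cons, pvRunsFrom, pvAStep]
    by_cases ha : PySem.Chars.isalnum c
    · simpa [ha] using ih parts (cur ++ [c])
    · by_cases hc : cur = []
      · simpa [ha, hc] using ih parts []
      · simpa [ha, hc] using ih (parts ++ [cur]) []

theorem pvRunsFrom_both (cs : List Char) :
    (pvRunsFrom [] cs = pvRuns cs) ∧
    ∀ (cur : List Char), cur ≠ [] →
      pvRunsFrom cur cs = (cur ++ cs.takeWhile PySem.Chars.isalnum) :: pvRuns (cs.dropWhile PySem.Chars.isalnum) := by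
  induction cs with
  | nil => constructor <;> simp [pvRunsFrom, pvRuns]
  | cons c rest ih =>
    obtain ⟨ih0, ihne⟩ := ih
    by_cases ha : PySem.Chars.isalnum c
    · constructor
      · rw [pvRunsFrom]
        simp only [ha, if_true, List.nil_append]
        rw [ihne [c] (by simp), pvRuns]
        simp [ha]
      · intro cur h
        rw [pvRunsFrom]
        simp only [ha, if_true]
        rw [ihne (cur ++ [c]) (by simp)]
        simp [ha]
    · constructor
      · rw [pvRunsFrom, pvRuns]
        simp [ha, ih0]
      · intro cur h
        rw [pvRunsFrom]
        simp only [ha, Bool.false_eq_true, if_false]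
        rw [if_pos h, ih0]
        have hstep : pvRuns (c :: rest) = pvRuns rest := by rw [pvRuns]; simp [ha]
        simp [ha, hstep]

theorem pvRuns_ne_nil (cs : List Char) : ∀ run ∈ pvRuns cs, run ≠ [] := by
  induction cs using pvRuns.induct with
  | case1 => simp [pvRuns]
  | case2 c rest ha ih =>
    rw [pvRuns]; simp only [ha, if_true]
    intro run hr
    rcases List.mem_cons.mp hr with h | h
    · simp [h]
    · exact ih run h
  | case3 c rest ha ih =>
    rw [pvRuns]; simp only [ha, Bool.false_eq_true, if_false]
    exact ih

theorem pvAltLoop_eq (cs : List Char) : pvAltLoop cs = ((pvRuns cs).map pvCap).flatten := by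
  induction cs using pvRuns.induct with
  | case1 => simp [pvAltLoop, pvRuns]
  | case2 c rest ha ih =>
    rw [pvAltLoop, pvRuns]
    simp only [ha, if_true, List.map_cons, List.flatten_cons, ih]
    congr 1
    simp [pvCap, PySem.Chars.slice, PySem.Chars.upper, PySem.List.slice,
      PySem.Chars.upperChar]
  | case3 c rest ha ih =>
    rw [pvAltLoop, pvRuns]
    simp [ha, ih]

-- ===== VERDICT (by name: the statement is the Claim_ definition above) =====
theorem normalize_endpoint_name_spec : Claim_equal_normalize_endpoint_name := by
  intro name _
  unfold Spec_normalize_endpoint_name normalize_endpoint_name normalize_endpoint_name_alt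
  simp only
  by_cases hall : name.toList.all PySem.Chars.isalnum
  · have hnil : (name.toList.filter (fun ch => !PySem.Chars.isalnum ch)) = [] := by
      simp only [List.filter_eq_nil_iff]
      intro a ha
      simp [List.all_eq_true.mp hall a ha]
    rw [if_pos (by simp [hnil]), if_pos hall]
  · have hf : (name.toList.filter (fun ch => !PySem.Chars.isalnum ch)).isEmpty = false := by
      simp only [List.isEmpty_eq_false_iff, ne_eq, List.filter_eq_nil_iff, not_forall]
      simp only [List.all_eq_true] at hall
      push Not at hall
      obtain ⟨x, hx, hxa⟩ := hall
      exact ⟨x, hx, by simp [hxa]⟩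
    rw [if_neg (by simp [hf]), if_neg hall]
    rw [pvA_loop_eq name.toList [] [], List.nil_append, (pvRunsFrom_both name.toList).1, pvAltLoop_eq]
    congr 1
    congr 1
    rw [List.filter_eq_self.mpr]
    intro run hr
    simpa using pvRuns_ne_nil name.toList run hr
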